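-- pv_equiv track=rewrite | github.com/bayhiker/python-algorithms | algorithms/dynamic_programming/backpack.py | backpack_x_dp
-- ===== SOURCE A (Python) =====
-- from typing import List
--
-- def backpack_x_dp(m: int, prices: List[int] = [150, 250, 350]) -> int:
--     dp_prev = [i for i in range(m + 1)]
--     dp_current = [i for i in range(m + 1)]
--     for i in range(len(prices)):
--         for j in range(1, m + 1):
--             for k in range(j // prices[i] + 1):
--                 current_tip = dp_prev[j - k * prices[i]]
--                 if dp_current[j] > current_tip:
--                     dp_current[j] = current_tip
--         dp_current, dp_prev = dp_prev, dp_current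
--         # Most recent valid result is now stored in dp_prev
--     return dp_prev[m]
-- ===== SOURCE B (Python) =====
-- from typing import List
--
-- def backpack_x_dp(m: int, prices: List[int] = [150, 250, 350]) -> int:
--     # one-array unbounded-knapsack DP: dp[j] = min(dp[j], dp[j - p]) ascending, O(len(prices)*m)
--     dp = list(range(m + 1))
--     for p in prices:
--         if p >= 1:
--             for j in range(p, m + 1):
--                 if dp[j - p] < dp[j]:
--                     dp[j] = dp[j - p]
--     return dp[m]
-- ===== Notes on version B (the rewrite author's own statement) =====
-- stated objective: faster
-- what changed: Replaces A's double-buffer DP with an inner scan over all multiples k of each price (and a buffer swap) by the classic single-array unbounded-knapsack recurrence dp[j]=min(dp[j],dp[j-p]) over ascending j, removing the k-loop entirely.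
-- outside the precondition, e.g. on backpack_x_dp(5, [2, -1, 3]): A returns 1, B returns 0; on backpack_x_dp(3, [0]): A raises ZeroDivisionError, B returns 3; on backpack_x_dp(-1, [2]): A raises IndexError, B raises IndexError
import Mathlib
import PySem

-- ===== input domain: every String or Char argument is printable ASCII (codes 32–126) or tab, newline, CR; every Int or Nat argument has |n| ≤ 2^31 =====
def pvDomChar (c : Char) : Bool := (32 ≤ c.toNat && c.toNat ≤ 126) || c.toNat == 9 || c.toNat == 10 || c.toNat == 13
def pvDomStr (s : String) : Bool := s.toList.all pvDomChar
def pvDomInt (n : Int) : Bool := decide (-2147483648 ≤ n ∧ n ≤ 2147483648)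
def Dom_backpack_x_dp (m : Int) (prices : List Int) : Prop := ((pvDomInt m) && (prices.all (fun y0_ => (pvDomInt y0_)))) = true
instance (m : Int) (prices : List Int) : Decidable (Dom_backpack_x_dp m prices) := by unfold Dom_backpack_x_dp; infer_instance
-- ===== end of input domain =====

-- B replaces A's double-buffer DP with inner multiples-scan by the classic one-array
-- unbounded-knapsack recurrence dp[j] = min(dp[j], dp[j-p]); asymptotically faster.
-- ===== PORT A =====
def backpack_x_dp (m : Int) (prices : List Int) : Int :=
  let dp_prev := PySem.List.pyRange 0 (m + 1) 1
  let dp_current := PySem.List.pyRange 0 (m + 1) 1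
  let st :=
    (PySem.List.pyRange 0 (PySem.List.len prices) 1).foldl
      (fun (st : List Int × List Int) i =>
        let cur :=
          (PySem.List.pyRange 1 (m + 1) 1).foldl
            (fun cur j =>
              (PySem.List.pyRange 0 (PySem.Int.floordiv j (PySem.List.pyGetD prices i 0) + 1) 1).foldl
                (fun cur k =>
                  let current_tip := PySem.List.pyGetD st.1 (j - k * PySem.List.pyGetD prices i 0) 0
                  if PySem.List.pyGetD cur j 0 > current_tip then
                    PySem.List.pySetD cur j current_tip
                  else cur)
                cur)
            st.2
        -- dp_current, dp_prev = dp_prev, dp_current  (swap)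
        (cur, st.1))
      (dp_prev, dp_current)
  PySem.List.pyGetD st.1 m 0

-- ===== PORT B =====
def backpack_x_dp_alt (m : Int) (prices : List Int) : Int :=
  let dp := PySem.List.pyRange 0 (m + 1) 1
  let dp :=
    prices.foldl
      (fun dp p =>
        if 1 ≤ p then
          (PySem.List.pyRange p (m + 1) 1).foldl
            (fun dp j =>
              if PySem.List.pyGetD dp (j - p) 0 < PySem.List.pyGetD dp j 0 then
                PySem.List.pySetD dp j (PySem.List.pyGetD dp (j - p) 0)
              else dp)
            dp
        else dp)
      dp
  PySem.List.pyGetD dp m 0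

-- ===== PRECONDITION & SPEC =====
-- Pre_ excludes: negative m, on which A raises IndexError; zero prices with m ≥ 1, on which A
-- raises ZeroDivisionError; and negative prices with m ≥ 1, a meaningless input for a price
-- list on which A's result is an accident of its buffer swap and neither value is specified.
def Pre_backpack_x_dp (m : Int) (prices : List Int) : Prop :=
  0 ≤ m ∧ (m = 0 ∨ ∀ p ∈ prices, 1 ≤ p)
instance (m : Int) (prices : List Int) : Decidable (Pre_backpack_x_dp m prices) := by
  unfold Pre_backpack_x_dp; infer_instance
def pvWitness_backpack_x_dp : Int × List Int := (5, [2, 3])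

def Spec_backpack_x_dp (m : Int) (prices : List Int) (out : Int) : Prop :=
  out = backpack_x_dp_alt m prices
instance (m : Int) (prices : List Int) (out : Int) : Decidable (Spec_backpack_x_dp m prices out) := by
  unfold Spec_backpack_x_dp; infer_instance

-- ===== CLAIM (what is proved, stated in full; the proofs are below) =====
def Claim_equal_backpack_x_dp : Prop :=
  ∀ (m : Int) (prices : List Int), Dom_backpack_x_dp m prices →
    Pre_backpack_x_dp m prices → Spec_backpack_x_dp m prices (backpack_x_dp m prices)
-- ===== LEMMAS AND PROOFS =====

-- table read used by both ports
def gI (l : List Int) (j : Int) : Int := PySem.List.pyGetD l j 0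

-- the true DP row: B's recurrence, as a function on Int
def bmin (p : Int) (F : Int → Int) (j : Int) : Int :=
  if _h : 1 ≤ p ∧ p ≤ j then min (bmin p F (j - p)) (F j) else F j
termination_by j.toNat
decreasing_by omega

def stepRow (F : Int → Int) (p : Int) : Int → Int := if 1 ≤ p then bmin p F else F

-- fold of min, and the k-scan minimum of A's inner loop
def fmin (f : Int → Int) (ks : List Int) (i : Int) : Int :=
  ks.foldl (fun a k => min a (f k)) i

def kmin (p : Int) (F : Int → Int) (j : Int) : Int :=
  fmin (fun k => F (j - k * p)) (PySem.List.pyRange 1 (PySem.Int.floordiv j p + 1) 1) (F j)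

-- a list is the table of a row on [0, m]
def Tbl (m : Int) (F : Int → Int) (l : List Int) : Prop :=
  l.length = (m + 1).toNat ∧ ∀ j : Int, 0 ≤ j → j ≤ m → gI l j = F j

-- loop bodies of the two ports (definitionally equal to the ports' foldl bodies)
def kbody (prev : List Int) (p j : Int) (cur : List Int) (k : Int) : List Int :=
  if PySem.List.pyGetD cur j 0 > PySem.List.pyGetD prev (j - k * p) 0 then
    PySem.List.pySetD cur j (PySem.List.pyGetD prev (j - k * p) 0)
  else cur

def jbodyA (prev : List Int) (p : Int) (cur : List Int) (j : Int) : List Int :=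
  (PySem.List.pyRange 0 (PySem.Int.floordiv j p + 1) 1).foldl (kbody prev p j) cur

def abody (m : Int) (st : List Int × List Int) (p : Int) : List Int × List Int :=
  ((PySem.List.pyRange 1 (m + 1) 1).foldl (jbodyA st.1 p) st.2, st.1)

def jbodyB (p : Int) (dp : List Int) (j : Int) : List Int :=
  if PySem.List.pyGetD dp (j - p) 0 < PySem.List.pyGetD dp j 0 then
    PySem.List.pySetD dp j (PySem.List.pyGetD dp (j - p) 0)
  else dp

def bbody (m : Int) (dp : List Int) (p : Int) : List Int :=
  if 1 ≤ p then (PySem.List.pyRange p (m + 1) 1).foldl (jbodyB p) dp else dp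

-- the invariant of A's outer loop: prev holds the current row, cur a stale (pointwise ≥) row
def AInv (m : Int) (P : Int → Int) (st : List Int × List Int) : Prop :=
  Tbl m P st.1 ∧ st.2.length = (m + 1).toNat ∧
    (∀ j : Int, 0 ≤ j → j ≤ m → P j ≤ gI st.2 j) ∧ gI st.2 0 = P 0

theorem bmin_le (p : Int) (F : Int → Int) (j : Int) : bmin p F j ≤ F j := by
  unfold bmin; split <;> simp

theorem bmin_of_lt (p : Int) (F : Int → Int) (j : Int) (h : ¬ (1 ≤ p ∧ p ≤ j)) :
    bmin p F j = F j := by rw [bmin]; simp [h]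

theorem bmin_of_le (p : Int) (F : Int → Int) (j : Int) (h1 : 1 ≤ p) (h2 : p ≤ j) :
    bmin p F j = min (bmin p F (j - p)) (F j) := by
  rw [bmin, dif_pos (⟨h1, h2⟩ : 1 ≤ p ∧ p ≤ j)]

theorem fmin_cons (f : Int → Int) (k : Int) (ks : List Int) (i : Int) :
    fmin f (k :: ks) i = fmin f ks (min i (f k)) := rfl

theorem fmin_le_init (f : Int → Int) (ks : List Int) (i : Int) : fmin f ks i ≤ i := by
  induction ks generalizing i with
  | nil => simp [fmin]
  | cons k ks ih => simpa [fmin] using le_trans (ih _) (min_le_left _ _)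

theorem fmin_min (f : Int → Int) (ks : List Int) (i j : Int) :
    fmin f ks (min i j) = min i (fmin f ks j) := by
  induction ks generalizing j with
  | nil => simp [fmin]
  | cons k ks ih =>
      simp only [fmin, List.foldl_cons] at *
      rw [min_assoc, ih]

theorem fmin_congr (f g : Int → Int) (ks : List Int) (i : Int)
    (h : ∀ k ∈ ks, f k = g k) : fmin f ks i = fmin g ks i := by
  induction ks generalizing i with
  | nil => rfl
  | cons k ks ih =>
      simp only [fmin, List.foldl_cons]
      rw [h k (by simp)]
      exact ih _ (fun k hk => h k (by simp [hk]))

theorem fmin_shift (f : Int → Int) (a b : Int) (i : Int) :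
    fmin f (PySem.List.pyRange (a + 1) (b + 1) 1) i
      = fmin (fun k => f (k + 1)) (PySem.List.pyRange a b 1) i := by
  by_cases hab : b ≤ a
  · rw [PySem.List.pyRange_one_eq_nil (by omega : b + 1 ≤ a + 1),
      PySem.List.pyRange_one_eq_nil hab]
    rfl
  · rw [PySem.List.pyRange_one_cons (a := a + 1) (b := b + 1) (by omega),
      PySem.List.pyRange_one_cons (a := a) (b := b) (by omega)]
    simp only [fmin_cons]
    exact fmin_shift f (a + 1) b (min i (f (a + 1)))
termination_by (b - a).toNat
decreasing_by omega

theorem kmin_eq_bmin (p : Int) (hp : 1 ≤ p) (F : Int → Int) (j : Int) (hj : 0 ≤ j) :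
    kmin p F j = bmin p F j := by
  by_cases hpj : p ≤ j
  · have hd := (PySem.Int.floordiv_eq_iff_of_pos (a := j) (b := p)
      (q := PySem.Int.floordiv j p) (by omega)).mp rfl
    have e3 : (PySem.Int.floordiv j p + 1) * p = PySem.Int.floordiv j p * p + p := by ring
    have hd1 : 1 ≤ PySem.Int.floordiv j p :=
      (PySem.Int.le_floordiv_iff_mul_le (by omega)).mpr (by omega)
    have hdsub : PySem.Int.floordiv (j - p) p = PySem.Int.floordiv j p - 1 := by
      rw [PySem.Int.floordiv_eq_iff_of_pos (by omega)]
      have e1 : (PySem.Int.floordiv j p - 1) * p = PySem.Int.floordiv j p * p - p := by ring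
      have e2 : (PySem.Int.floordiv j p - 1 + 1) * p = PySem.Int.floordiv j p * p := by ring
      omega
    have h1 : kmin p F j
        = fmin (fun k => F (j - k * p))
            (PySem.List.pyRange (1 + 1) (PySem.Int.floordiv j p + 1) 1)
            (min (F j) (F (j - p))) := by
      unfold kmin
      rw [PySem.List.pyRange_one_cons (a := 1) (b := PySem.Int.floordiv j p + 1) (by omega)]
      simp only [fmin_cons]
      rw [show j - 1 * p = j - p by ring]
    have h2 := fmin_shift (fun k => F (j - k * p)) 1 (PySem.Int.floordiv j p)
      (min (F j) (F (j - p)))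
    have h3 : fmin (fun k => (fun k => F (j - k * p)) (k + 1))
          (PySem.List.pyRange 1 (PySem.Int.floordiv j p) 1) (min (F j) (F (j - p)))
        = fmin (fun k => F ((j - p) - k * p))
            (PySem.List.pyRange 1 (PySem.Int.floordiv j p) 1) (min (F j) (F (j - p))) :=
      fmin_congr _ _ _ _ (fun k _ => by
        show F (j - (k + 1) * p) = F ((j - p) - k * p); congr 1; ring)
    have h4 := fmin_min (fun k => F ((j - p) - k * p))
      (PySem.List.pyRange 1 (PySem.Int.floordiv j p) 1) (F j) (F (j - p))
    have h5 : kmin p F (j - p)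
        = fmin (fun k => F ((j - p) - k * p))
            (PySem.List.pyRange 1 (PySem.Int.floordiv j p) 1) (F (j - p)) := by
      unfold kmin
      rw [hdsub, show PySem.Int.floordiv j p - 1 + 1 = PySem.Int.floordiv j p by ring]
    have hstep : kmin p F j = min (F j) (kmin p F (j - p)) := by
      rw [h1, h2, h3, h4, ← h5]
    rw [hstep, kmin_eq_bmin p hp F (j - p) (by omega), bmin_of_le p F j hp hpj, min_comm]
  · have hd0 : PySem.Int.floordiv j p = 0 := by
      rw [PySem.Int.floordiv_eq_iff_of_pos (by omega)]; constructor <;> omega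
    unfold kmin
    rw [hd0, PySem.List.pyRange_one_eq_nil (by norm_num), bmin_of_lt _ _ _ (by omega)]
    rfl
termination_by j.toNat
decreasing_by omega

theorem gI_set_self (l : List Int) (j v : Int) (hj : 0 ≤ j) (h : j.toNat < l.length) :
    gI (l.set j.toNat v) j = v := by
  unfold gI
  rw [PySem.List.pyGetD_eq_getElem _ _ hj (by simpa using (by omega : (j : Int) < l.length))]
  simp

theorem gI_set_ne (l : List Int) (i j v : Int) (hi : 0 ≤ i) (hil : i < (l.length : Int))
    (hj : 0 ≤ j) (hij : i ≠ j) : gI (l.set j.toNat v) i = gI l i := by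
  unfold gI
  rw [PySem.List.pyGetD_eq_getElem _ _ hi (by simpa using hil),
    PySem.List.pyGetD_eq_getElem _ _ hi hil]
  rw [List.getElem_set_ne (by omega)]

theorem kloop_eq (prev : List Int) (p j : Int) (ks : List Int) (cur : List Int)
    (hj : 0 ≤ j) (hl : j.toNat < cur.length) :
    ks.foldl (kbody prev p j) cur
      = cur.set j.toNat (fmin (fun k => PySem.List.pyGetD prev (j - k * p) 0) ks (gI cur j)) := by
  induction ks generalizing cur with
  | nil =>
      simp only [List.foldl_nil, fmin, List.foldl_nil]
      unfold gI
      rw [PySem.List.pyGetD_eq_getElem _ _ hj (by simpa using (by omega : (j : Int) < cur.length))]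
      simp
  | cons k ks ih =>
      rw [List.foldl_cons]
      simp only [fmin_cons]
      by_cases h : PySem.List.pyGetD cur j 0 > PySem.List.pyGetD prev (j - k * p) 0
      · rw [show kbody prev p j cur k
            = PySem.List.pySetD cur j (PySem.List.pyGetD prev (j - k * p) 0) by
          unfold kbody; rw [if_pos h]]
        rw [PySem.List.pySetD_of_nonneg _ _ hj]
        rw [ih _ (by simpa using hl), List.set_set]
        rw [gI_set_self _ _ _ hj hl]
        rw [show min (gI cur j) (PySem.List.pyGetD prev (j - k * p) 0)
            = PySem.List.pyGetD prev (j - k * p) 0 by unfold gI; omega]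
      · rw [show kbody prev p j cur k = cur by unfold kbody; rw [if_neg h]]
        rw [ih _ hl]
        rw [show min (gI cur j) (PySem.List.pyGetD prev (j - k * p) 0)
            = gI cur j by unfold gI; omega]

theorem Aloop (m p : Int) (P : Int → Int) (prev : List Int) (hp : 1 ≤ p) (hm : 0 ≤ m)
    (hprev : Tbl m P prev) (a : Int) (cur : List Int) (ha : 1 ≤ a)
    (hl : cur.length = (m + 1).toNat) :
    ((PySem.List.pyRange a (m + 1) 1).foldl (jbodyA prev p) cur).length = (m + 1).toNat ∧
    ∀ j : Int, 0 ≤ j → j ≤ m →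
      gI ((PySem.List.pyRange a (m + 1) 1).foldl (jbodyA prev p) cur) j
        = if a ≤ j then min (gI cur j) (kmin p P j) else gI cur j := by
  by_cases hab : m + 1 ≤ a
  · rw [PySem.List.pyRange_one_eq_nil hab]
    refine ⟨hl, fun j h0 h1 => ?_⟩
    simp only [List.foldl_nil]
    rw [if_neg (by omega)]
  · rw [PySem.List.pyRange_one_cons (by omega), List.foldl_cons]
    have hd0 : 0 ≤ PySem.Int.floordiv a p :=
      (PySem.Int.le_floordiv_iff_mul_le (by omega)).mpr (by omega)
    have hd := (PySem.Int.floordiv_eq_iff_of_pos (a := a) (b := p)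
      (q := PySem.Int.floordiv a p) (by omega)).mp rfl
    have hcur' : jbodyA prev p cur a = cur.set a.toNat (min (gI cur a) (kmin p P a)) := by
      unfold jbodyA
      rw [kloop_eq prev p a _ cur (by omega) (by omega)]
      congr 1
      have hpeel : fmin (fun k => PySem.List.pyGetD prev (a - k * p) 0)
          (PySem.List.pyRange 0 (PySem.Int.floordiv a p + 1) 1) (gI cur a)
          = fmin (fun k => PySem.List.pyGetD prev (a - k * p) 0)
              (PySem.List.pyRange 1 (PySem.Int.floordiv a p + 1) 1)
              (min (gI cur a) (P a)) := by
        rw [PySem.List.pyRange_one_cons (a := 0) (b := PySem.Int.floordiv a p + 1) (by omega)]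
        simp only [fmin_cons, zero_add]
        rw [show a - 0 * p = a by ring,
          show PySem.List.pyGetD prev a 0 = P a from hprev.2 a (by omega) (by omega)]
      rw [hpeel]
      have hc : ∀ k ∈ PySem.List.pyRange 1 (PySem.Int.floordiv a p + 1) 1,
          PySem.List.pyGetD prev (a - k * p) 0 = P (a - k * p) := by
        intro k hk
        rw [PySem.List.mem_pyRange_one] at hk
        have hkp : k * p ≤ PySem.Int.floordiv a p * p :=
          mul_le_mul_of_nonneg_right (by omega) (by omega)
        have hkp0 : 0 ≤ k * p := mul_nonneg (by omega) (by omega)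
        exact hprev.2 _ (by omega) (by omega)
      rw [fmin_congr _ _ _ _ hc]
      exact fmin_min (fun k => P (a - k * p)) _ (gI cur a) (P a)
    rw [hcur']
    obtain ⟨ihl, ihres⟩ := Aloop m p P prev hp hm hprev (a + 1)
      (cur.set a.toNat (min (gI cur a) (kmin p P a))) (by omega) (by simpa using hl)
    refine ⟨ihl, fun j h0 h1 => ?_⟩
    rw [ihres j h0 h1]
    by_cases hja : j = a
    · subst hja
      rw [if_neg (by omega), if_pos (by omega)]
      exact gI_set_self _ _ _ (by omega) (by omega)
    · rw [gI_set_ne _ _ _ _ h0 (by rw [hl]; omega) (by omega) hja]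
      by_cases hja2 : a ≤ j
      · rw [if_pos (by omega), if_pos hja2]
      · rw [if_neg (by omega), if_neg hja2]
termination_by (m + 1 - a).toNat
decreasing_by omega

theorem Astep (m p : Int) (hm : 0 ≤ m) (hp : 1 ≤ p) (P : Int → Int)
    (st : List Int × List Int) (h : AInv m P st) : AInv m (bmin p P) (abody m st p) := by
  obtain ⟨hT, hcl, hge, hc0⟩ := h
  obtain ⟨hlen, hres⟩ := Aloop m p P st.1 hp hm hT 1 st.2 (by omega) hcl
  unfold abody
  refine ⟨⟨hlen, fun j h0 h1 => ?_⟩, hT.1, fun j h0 h1 => ?_, ?_⟩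
  · rw [hres j h0 h1]
    by_cases hj1 : 1 ≤ j
    · rw [if_pos hj1]
      have h1' : kmin p P j ≤ P j := fmin_le_init _ _ _
      have h2' : P j ≤ gI st.2 j := hge j h0 h1
      rw [min_eq_right (by omega), kmin_eq_bmin p hp P j h0]
    · rw [if_neg hj1]
      have hj0 : j = 0 := by omega
      subst hj0
      rw [hc0, bmin_of_lt _ _ _ (by omega)]
  · rw [hT.2 j h0 h1]; exact bmin_le p P j
  · rw [hT.2 0 (by omega) hm, bmin_of_lt _ _ _ (by omega)]

theorem Afold (m : Int) (hm : 0 ≤ m) (ps : List Int) :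
    ∀ (P : Int → Int) (st : List Int × List Int), (∀ p ∈ ps, 1 ≤ p) → AInv m P st →
      AInv m (ps.foldl stepRow P) (ps.foldl (abody m) st) := by
  induction ps with
  | nil => intro P st _ h; exact h
  | cons p ps ih =>
      intro P st hall h
      simp only [List.foldl_cons]
      have hp : 1 ≤ p := hall p (by simp)
      rw [show stepRow P p = bmin p P by unfold stepRow; rw [if_pos hp]]
      exact ih (bmin p P) (abody m st p) (fun q hq => hall q (by simp [hq]))
        (Astep m p hm hp P st h)

theorem Bloop (m p : Int) (hp : 1 ≤ p) (hm : 0 ≤ m) (F : Int → Int) (a : Int) (dp : List Int)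
    (hpa : p ≤ a) (hl : dp.length = (m + 1).toNat)
    (hdp : ∀ j : Int, 0 ≤ j → j ≤ m → gI dp j = if j < a then bmin p F j else F j) :
    ((PySem.List.pyRange a (m + 1) 1).foldl (jbodyB p) dp).length = (m + 1).toNat ∧
    ∀ j : Int, 0 ≤ j → j ≤ m →
      gI ((PySem.List.pyRange a (m + 1) 1).foldl (jbodyB p) dp) j = bmin p F j := by
  by_cases hab : m + 1 ≤ a
  · rw [PySem.List.pyRange_one_eq_nil hab]
    refine ⟨hl, fun j h0 h1 => ?_⟩
    simp only [List.foldl_nil]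
    rw [hdp j h0 h1, if_pos (by omega)]
  · rw [PySem.List.pyRange_one_cons (by omega), List.foldl_cons]
    have hga : gI dp a = F a := by
      rw [hdp a (by omega) (by omega), if_neg (by omega)]
    have hgap : gI dp (a - p) = bmin p F (a - p) := by
      rw [hdp (a - p) (by omega) (by omega), if_pos (by omega)]
    have hbm := bmin_of_le p F a hp hpa
    have hbb : jbodyB p dp a = dp.set a.toNat (bmin p F a) := by
      unfold jbodyB
      unfold gI at hga hgap
      split_ifs with h
      · rw [PySem.List.pySetD_of_nonneg _ _ (by omega : (0 : Int) ≤ a), hgap, hbm,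
          min_eq_left (by omega)]
      · have hv : bmin p F a = PySem.List.pyGetD dp a 0 := by
          rw [hbm, min_eq_right (by omega), hga]
        rw [hv, PySem.List.pyGetD_eq_getElem _ _ (by omega : (0 : Int) ≤ a)
          (by simp only [hl]; omega)]
        exact (List.set_getElem_self (by simp only [hl]; omega)).symm
    rw [hbb]
    have hdp' : ∀ j : Int, 0 ≤ j → j ≤ m →
        gI (dp.set a.toNat (bmin p F a)) j = if j < a + 1 then bmin p F j else F j := by
      intro j h0 h1
      by_cases hja : j = a
      · subst hja
        rw [gI_set_self _ _ _ (by omega) (by omega), if_pos (by omega)]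
      · rw [gI_set_ne _ _ _ _ h0 (by rw [hl]; omega) (by omega) hja, hdp j h0 h1]
        by_cases hja2 : j < a
        · rw [if_pos hja2, if_pos (by omega)]
        · rw [if_neg hja2, if_neg (by omega)]
    exact Bloop m p hp hm F (a + 1) (dp.set a.toNat (bmin p F a))
      (by omega) (by simpa using hl) hdp'
termination_by (m + 1 - a).toNat
decreasing_by omega

theorem Bstep (m p : Int) (hm : 0 ≤ m) (F : Int → Int) (dp : List Int) (h : Tbl m F dp) :
    Tbl m (stepRow F p) (bbody m dp p) := by
  unfold bbody stepRow
  split_ifs with hp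
  · have hdp : ∀ j : Int, 0 ≤ j → j ≤ m → gI dp j = if j < p then bmin p F j else F j := by
      intro j h0 h1
      rw [h.2 j h0 h1]
      split_ifs with hjp
      · rw [bmin_of_lt _ _ _ (by omega)]
      · rfl
    obtain ⟨hl, hres⟩ := Bloop m p hp hm F p dp (le_refl p) h.1 hdp
    exact ⟨hl, hres⟩
  · exact h

theorem Bfold (m : Int) (hm : 0 ≤ m) (ps : List Int) :
    ∀ (F : Int → Int) (dp : List Int), Tbl m F dp →
      Tbl m (ps.foldl stepRow F) (ps.foldl (bbody m) dp) := by
  induction ps with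
  | nil => intro F dp h; exact h
  | cons p ps ih =>
      intro F dp h
      simp only [List.foldl_cons]
      exact ih (stepRow F p) (bbody m dp p) (Bstep m p hm F dp h)

theorem Tbl_init (m : Int) (hm : 0 ≤ m) :
    Tbl m (fun j => j) (PySem.List.pyRange 0 (m + 1) 1) := by
  constructor
  · rw [PySem.List.length_pyRange_one]; omega
  · intro j h0 h1
    unfold gI
    have hlen : (PySem.List.pyRange 0 (m + 1) 1).length = (m + 1 - 0).toNat :=
      PySem.List.length_pyRange_one 0 (m + 1)
    rw [PySem.List.pyGetD_eq_getElem _ _ h0 (by rw [hlen]; omega)]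
    rw [PySem.List.getElem_pyRange_one]
    show (0 : Int) + (j.toNat : Int) = j
    omega

-- the two returned expressions, written through the named bodies (definitional)
theorem hA_shape (m : Int) (prices : List Int) :
    backpack_x_dp m prices
      = PySem.List.pyGetD
          (((PySem.List.pyRange 0 (PySem.List.len prices) 1).foldl
              (fun st i => abody m st (PySem.List.pyGetD prices i 0))
              (PySem.List.pyRange 0 (m + 1) 1, PySem.List.pyRange 0 (m + 1) 1)).1) m 0 := rfl

theorem hB_shape (m : Int) (prices : List Int) :
    backpack_x_dp_alt m prices
      = PySem.List.pyGetD (prices.foldl (bbody m) (PySem.List.pyRange 0 (m + 1) 1)) m 0 := rfl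

theorem abody_zero_swap (st : List Int × List Int) (p : Int) :
    abody 0 st p = (st.2, st.1) := by
  unfold abody
  rw [PySem.List.pyRange_one_eq_nil (by norm_num)]
  rfl

theorem afold_zero (ps : List Int) : ∀ (x : List Int),
    ps.foldl (abody 0) (x, x) = (x, x) := by
  induction ps with
  | nil => intro x; rfl
  | cons p ps ih =>
      intro x
      rw [List.foldl_cons, abody_zero_swap]
      exact ih x

theorem bbody_zero (dp : List Int) (p : Int) : bbody 0 dp p = dp := by
  unfold bbody
  split_ifs with h
  · rw [PySem.List.pyRange_one_eq_nil (by omega)]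
    rfl
  · rfl

theorem bfold_zero (ps : List Int) (dp : List Int) : ps.foldl (bbody 0) dp = dp := by
  induction ps with
  | nil => rfl
  | cons p ps ih => rw [List.foldl_cons, bbody_zero]; exact ih

theorem main_equiv (m : Int) (prices : List Int) (h0 : 0 ≤ m)
    (hp : m = 0 ∨ ∀ p ∈ prices, 1 ≤ p) :
    backpack_x_dp m prices = backpack_x_dp_alt m prices := by
  rcases hp with hm0 | hall
  · subst hm0
    rw [hA_shape, hB_shape]
    rw [PySem.List.foldl_pyRange_pyGetD prices 0 (abody 0) _ (le_refl 0)]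
    simp only [Int.toNat_zero, List.drop_zero]
    rw [afold_zero prices _, bfold_zero]
  · rw [hA_shape, hB_shape]
    rw [PySem.List.foldl_pyRange_pyGetD prices 0 (abody m) _ (le_refl 0)]
    simp only [Int.toNat_zero, List.drop_zero]
    have hinit := Tbl_init m h0
    have hAinv : AInv m (fun j => j)
        (PySem.List.pyRange 0 (m + 1) 1, PySem.List.pyRange 0 (m + 1) 1) := by
      refine ⟨hinit, hinit.1, fun j hj0 hj1 => ?_, ?_⟩
      · rw [hinit.2 j hj0 hj1]
      · rw [hinit.2 0 (le_refl 0) h0]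
    have hA := (Afold m h0 prices (fun j => j) _ hall hAinv).1
    have hB := Bfold m h0 prices (fun j => j) _ hinit
    have e1 : gI ((prices.foldl (abody m)
        (PySem.List.pyRange 0 (m + 1) 1, PySem.List.pyRange 0 (m + 1) 1)).1) m
        = (prices.foldl stepRow (fun j => j)) m := hA.2 m h0 (le_refl m)
    have e2 : gI (prices.foldl (bbody m) (PySem.List.pyRange 0 (m + 1) 1)) m
        = (prices.foldl stepRow (fun j => j)) m := hB.2 m h0 (le_refl m)
    unfold gI at e1 e2
    rw [e1, e2]

-- ===== VERDICT (by name: the statement is the Claim_ definition above) =====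
theorem backpack_x_dp_spec : Claim_equal_backpack_x_dp := by
  intro m prices _ hpre
  exact main_equiv m prices hpre.1 hpre.2
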